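-- pv_equiv track=rewrite | github.com/kk7k3r/PythonTask | mod2/task11.py | same_numbers
-- ===== SOURCE A (Python) =====
-- def same_numbers(str):
--     temp = ""
--     for i in range(len(str)):
--         if (not str[i].isdigit()):
--             continue;
--         if (str[i] in temp):
--             return True
--         temp += str[i];
--     return False
-- ===== SOURCE B (Python) =====
-- def same_numbers(str):
--     digits = [c for c in str if c.isdigit()]
--     return len(digits) != len(set(digits))
-- ===== Notes on version B (the rewrite author's own statement) =====
-- stated objective: simpler
-- what changed: Replaces the incremental accumulator with early-return membership checks by a two-phase build-then-compare: collect all digit characters once, then report a duplicate iff the list and its set have different cardinalities.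
import Mathlib
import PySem

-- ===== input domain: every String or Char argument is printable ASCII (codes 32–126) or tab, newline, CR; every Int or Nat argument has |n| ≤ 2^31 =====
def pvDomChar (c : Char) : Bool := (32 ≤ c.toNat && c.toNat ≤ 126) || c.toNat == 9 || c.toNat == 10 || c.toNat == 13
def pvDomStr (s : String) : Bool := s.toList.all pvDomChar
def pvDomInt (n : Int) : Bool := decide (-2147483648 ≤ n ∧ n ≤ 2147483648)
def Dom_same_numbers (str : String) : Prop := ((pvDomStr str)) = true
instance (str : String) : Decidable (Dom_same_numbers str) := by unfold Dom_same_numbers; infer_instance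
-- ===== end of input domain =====

-- B replaces A's incremental accumulator-and-early-return scan by a build-then-compare pass
-- (collect all digits, compare list length with set length); objective: simpler.

-- ===== PORT A =====
-- loop over the characters carrying the accumulator string `temp` (as List Char), early return = result true
def sameNumbersLoop : List Char → List Char → Bool
  | [], _ => false
  | c :: rest, temp =>
    if !PySem.Chars.isdigit c then sameNumbersLoop rest temp
    else if temp.contains c then true
    else sameNumbersLoop rest (temp ++ [c])

def same_numbers (str : String) : Bool := sameNumbersLoop str.toList []

-- ===== PORT B =====
def same_numbers_alt (str : String) : Bool :=
  let digits := str.toList.filter PySem.Chars.isdigit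
  decide (digits.length ≠ (PySem.Set.ofList digits).length)

-- ===== PRECONDITION & SPEC =====
def Spec_same_numbers (str : String) (out : Bool) : Prop := out = same_numbers_alt str
instance (str : String) (out : Bool) : Decidable (Spec_same_numbers str out) := by unfold Spec_same_numbers; infer_instance

-- ===== CLAIM (what is proved, stated in full; the proofs are below) =====
def Claim_equal_same_numbers : Prop := ∀ (str : String), Dom_same_numbers str → Spec_same_numbers str (same_numbers str)

-- ===== LEMMAS AND PROOFS =====

theorem ofList_sublist {α : Type} [BEq α] [LawfulBEq α] (xs : List α) :
    (PySem.Set.ofList xs).Sublist xs := by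
  induction xs with
  | nil => simp
  | cons x xs ih =>
    rw [PySem.Set.ofList_cons]
    exact List.Sublist.cons₂ x (List.Sublist.trans List.filter_sublist ih)

theorem length_ofList_eq_iff_nodup {α : Type} [BEq α] [LawfulBEq α] (xs : List α) :
    (PySem.Set.ofList xs).length = xs.length ↔ xs.Nodup := by
  constructor
  · intro h
    have he := (ofList_sublist xs).eq_of_length h
    rw [← he]
    exact PySem.Set.nodup_ofList xs
  · intro h
    rw [PySem.Set.ofList_eq_self_of_nodup xs h]

theorem sameNumbersLoop_eq (l temp : List Char) (hnd : temp.Nodup) :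
    sameNumbersLoop l temp = !decide ((temp ++ l.filter PySem.Chars.isdigit).Nodup) := by
  induction l generalizing temp with
  | nil => simp [sameNumbersLoop, hnd]
  | cons c rest ih =>
    rw [List.filter_cons]
    by_cases hd : PySem.Chars.isdigit c
    · rw [if_pos hd]
      by_cases hm : c ∈ temp
      · have hnot : ¬(temp ++ c :: rest.filter PySem.Chars.isdigit).Nodup := by
          intro hnodup
          exact (List.disjoint_of_nodup_append hnodup) hm List.mem_cons_self
        have hL : sameNumbersLoop (c :: rest) temp = true := by
          simp [sameNumbersLoop, hd, hm]
        rw [hL, decide_eq_false hnot, Bool.not_false]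
      · have hnd' : (temp ++ [c]).Nodup := by
          rw [List.nodup_append]
          refine ⟨hnd, List.nodup_singleton c, ?_⟩
          intro a ha b hb hab
          subst hab
          rw [List.mem_singleton] at hb
          exact hm (hb ▸ ha)
        have hstep : sameNumbersLoop (c :: rest) temp = sameNumbersLoop rest (temp ++ [c]) := by
          simp [sameNumbersLoop, hd, hm]
        rw [hstep, ih (temp ++ [c]) hnd', List.append_assoc, List.singleton_append]
    · rw [if_neg hd]
      have hstep : sameNumbersLoop (c :: rest) temp = sameNumbersLoop rest temp := by
        simp [sameNumbersLoop, hd]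
      rw [hstep]
      exact ih temp hnd

-- ===== VERDICT (by name: the statement is the Claim_ definition above) =====
theorem same_numbers_spec : Claim_equal_same_numbers := by
  intro str _
  unfold Spec_same_numbers same_numbers same_numbers_alt
  rw [sameNumbersLoop_eq _ [] List.nodup_nil]
  simp only [List.nil_append]
  set ds := str.toList.filter PySem.Chars.isdigit with hds
  have hle := PySem.Set.length_ofList_le (xs := ds)
  by_cases h : ds.Nodup
  · simp [h, ((length_ofList_eq_iff_nodup ds).mpr h)]
  · have : (PySem.Set.ofList ds).length ≠ ds.length := fun he =>
      h ((length_ofList_eq_iff_nodup ds).mp he)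
    simp [h, Ne.symm this]
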